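-- pv_equiv track=rewrite | github.com/xinCNnix/miniClaw | backend/app/memory/prompts.py | _truncate_prompt
-- ===== SOURCE A (Python) =====
-- def _truncate_prompt(
--
--     prompt: str,
--     max_length: int,
--     marker: str,
-- ) -> str:
--     """
--     Truncate prompt to max length.
--
--     Args:
--         prompt: Full prompt
--         max_length: Maximum length
--         marker: Truncation marker
--
--     Returns:
--         Truncated prompt
--     """
--     if len(prompt) <= max_length:
--         return prompt
--
--     # Try to truncate at component boundary
--     parts = prompt.split("\n\n---\n\n")
--     truncated_parts = []
--     current_length = 0
--
--     for part in parts: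
--         part_length = len(part) + 5  # Include separator
--
--         if current_length + part_length > max_length:
--             # Don't add this part
--             truncated_parts.append(marker)
--             break
--
--         truncated_parts.append(part)
--         current_length += part_length
--
--     return "\n\n---\n\n".join(truncated_parts)
-- ===== SOURCE B (Python) =====
-- SEP = "\n\n---\n\n"
--
--
-- def _truncate_prompt(prompt, max_length, marker):
--     if len(prompt) <= max_length:
--         return prompt
--     parts = prompt.split(SEP)
--     # prefix-sum table of the per-part budget costs
--     cums = []
--     total = 0
--     for p in parts:
--         total += len(p) + 5
--         cums.append(total)
--     # first index whose cumulative cost exceeds the budget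
--     cut = next((i for i, c in enumerate(cums) if c > max_length), len(parts))
--     if cut == len(parts):
--         return SEP.join(parts)
--     return SEP.join(parts[:cut] + [marker])
-- ===== Notes on version B (the rewrite author's own statement) =====
-- stated objective: alternative
-- what changed: A appends parts one by one inside a single loop that breaks and injects the marker when the running budget overflows; B first builds a prefix-sum table of per-part costs len(p)+5, locates the first index whose cumulative sum exceeds max_length, and reconstructs the result once by slicing and joining (full prompt if no index exceeds).
import Mathlib
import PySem

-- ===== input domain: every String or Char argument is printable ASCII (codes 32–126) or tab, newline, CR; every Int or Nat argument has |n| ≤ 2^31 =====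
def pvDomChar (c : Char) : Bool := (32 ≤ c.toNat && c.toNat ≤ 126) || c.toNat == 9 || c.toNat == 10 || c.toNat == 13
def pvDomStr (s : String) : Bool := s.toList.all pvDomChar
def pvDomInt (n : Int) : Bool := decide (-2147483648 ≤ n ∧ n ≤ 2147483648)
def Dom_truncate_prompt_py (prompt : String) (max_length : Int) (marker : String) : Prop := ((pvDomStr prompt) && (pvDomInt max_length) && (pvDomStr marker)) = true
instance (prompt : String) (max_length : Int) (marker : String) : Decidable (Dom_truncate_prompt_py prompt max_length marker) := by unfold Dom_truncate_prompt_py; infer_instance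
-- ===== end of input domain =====

-- B replaces A's build-as-you-go loop (append parts until one overflows, then append the marker and break)
-- by a prefix-sum table of the per-part costs, a first-exceeding-index search, and a slice+join; same values, alternative decomposition.


-- ===== PORT A =====
-- the 'for part in parts' loop with its break: accumulator = truncated_parts, current_length
def pvTruncLoopA (max_length : Int) (marker : String) : List String → List String → Int → List String
  | [], acc, _ => acc
  | part :: rest, acc, cur =>
      let part_length := PySem.Str.len part + 5
      if cur + part_length > max_length then acc ++ [marker]
      else pvTruncLoopA max_length marker rest (acc ++ [part]) (cur + part_length)

def truncate_prompt_py (prompt : String) (max_length : Int) (marker : String) : String :=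
  if PySem.Str.len prompt ≤ max_length then prompt
  else
    let parts := ((PySem.Str.split? prompt "\n\n---\n\n").getD [])
    PySem.Str.join "\n\n---\n\n" (pvTruncLoopA max_length marker parts [] 0)

-- ===== PORT B =====
-- the prefix-sum table 'cums' (running total of len(p)+5)
def pvCumsB : List String → Int → List Int
  | [], _ => []
  | p :: rest, total =>
      let total' := total + (PySem.Str.len p + 5)
      total' :: pvCumsB rest total'

def truncate_prompt_py_alt (prompt : String) (max_length : Int) (marker : String) : String :=
  if PySem.Str.len prompt ≤ max_length then prompt
  else
    let parts := ((PySem.Str.split? prompt "\n\n---\n\n").getD [])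
    let cums := pvCumsB parts 0
    -- next((i for i, c in enumerate(cums) if c > max_length), len(parts))
    let cut : Nat := (cums.findIdx? (fun c => max_length < c)).getD parts.length
    if cut = parts.length then PySem.Str.join "\n\n---\n\n" parts
    else PySem.Str.join "\n\n---\n\n" (parts.take cut ++ [marker])

-- ===== PRECONDITION & SPEC =====
def Spec_truncate_prompt_py (prompt : String) (max_length : Int) (marker : String) (out : String) : Prop := out = truncate_prompt_py_alt prompt max_length marker
instance (prompt : String) (max_length : Int) (marker : String) (out : String) : Decidable (Spec_truncate_prompt_py prompt max_length marker out) := by unfold Spec_truncate_prompt_py; infer_instance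

-- ===== CLAIM (what is proved, stated in full; the proofs are below) =====
def Claim_equal_truncate_prompt_py : Prop := ∀ (prompt : String) (max_length : Int) (marker : String), Dom_truncate_prompt_py prompt max_length marker → Spec_truncate_prompt_py prompt max_length marker (truncate_prompt_py prompt max_length marker)

-- ===== LEMMAS AND PROOFS =====

-- length of the prefix-sum table
theorem pvCumsB_length (parts : List String) (t : Int) : (pvCumsB parts t).length = parts.length := by
  induction parts generalizing t with
  | nil => simp [pvCumsB]
  | cons p rest ih => simp [pvCumsB, ih]

-- A's loop, characterised by the first index of the prefix-sum table exceeding the budget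
theorem pvTruncLoopA_eq (max_length : Int) (marker : String) (parts acc : List String) (cur : Int) :
    pvTruncLoopA max_length marker parts acc cur =
      acc ++ (match (pvCumsB parts cur).findIdx? (fun c => max_length < c) with
              | none => parts
              | some i => parts.take i ++ [marker]) := by
  induction parts generalizing acc cur with
  | nil => simp [pvTruncLoopA, pvCumsB]
  | cons p rest ih =>
    simp only [pvTruncLoopA, pvCumsB, PySem.Str.len, List.findIdx?_cons, decide_eq_true_eq]
    by_cases hcond : max_length < cur + ((p.length : Int) + 5)
    · simp [hcond]
    · simp only [ih]
      cases hfi : (pvCumsB rest (cur + ((p.length : Int) + 5))).findIdx? (fun c => max_length < c) with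
      | none => simp [hcond, hfi]
      | some i => simp [hcond, hfi]

-- the else-branch bodies of the two ports agree, for any list of parts
theorem pvBody_eq (max_length : Int) (marker : String) (parts : List String) :
    PySem.Str.join "\n\n---\n\n" (pvTruncLoopA max_length marker parts [] 0) =
      (let cut : Nat := ((pvCumsB parts 0).findIdx? (fun c => max_length < c)).getD parts.length
       if cut = parts.length then PySem.Str.join "\n\n---\n\n" parts
       else PySem.Str.join "\n\n---\n\n" (parts.take cut ++ [marker])) := by
  rw [pvTruncLoopA_eq]
  cases hfi : (pvCumsB parts 0).findIdx? (fun c => max_length < c) with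
  | none => simp
  | some i =>
    have hlt : i < parts.length := by
      have := List.findIdx?_eq_some_iff_findIdx_eq.mp hfi
      have hl := this.1
      rwa [pvCumsB_length] at hl
    simp [Nat.ne_of_lt hlt]

theorem truncate_prompt_py_eq (prompt : String) (max_length : Int) (marker : String) :
    truncate_prompt_py prompt max_length marker = truncate_prompt_py_alt prompt max_length marker := by
  unfold truncate_prompt_py truncate_prompt_py_alt
  by_cases h : PySem.Str.len prompt ≤ max_length
  · rw [if_pos h, if_pos h]
  · rw [if_neg h, if_neg h]
    exact pvBody_eq max_length marker ((PySem.Str.split? prompt "\n\n---\n\n").getD [])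

-- ===== VERDICT (by name: the statement is the Claim_ definition above) =====
theorem truncate_prompt_py_spec : Claim_equal_truncate_prompt_py := by
  intro prompt max_length marker _
  exact truncate_prompt_py_eq prompt max_length marker
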